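-- pv_equiv track=rewrite | github.com/welcome-to-the-sunny-side/libra | waifu/convert/inline.py | _rebuild_stream
-- ===== SOURCE A (Python) =====
-- from typing import List, Tuple
--
-- _WORD_KINDS = {"ID", "NUM", "STRING", "CHAR"}
--
-- def _rebuild_stream(tokens: List[Tuple[str, str]]) -> List[str]:
--     out: List[str] = []
--     prev_kind = None
--     for kind, text in tokens:
--         if prev_kind in _WORD_KINDS and kind in _WORD_KINDS:
--             out.append("/**/")
--         out.append(text)
--         prev_kind = kind
--     return out
-- ===== SOURCE B (Python) =====
-- _WORD_KINDS = {"ID", "NUM", "STRING", "CHAR"}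
--
-- def _rebuild_stream(tokens):
--     # Stage 1: split the stream into maximal runs of equal word-ness.
--     runs = []
--     i, n = 0, len(tokens)
--     while i < n:
--         b = tokens[i][0] in _WORD_KINDS
--         j = i + 1
--         while j < n and (tokens[j][0] in _WORD_KINDS) == b:
--             j += 1
--         runs.append((b, [text for _, text in tokens[i:j]]))
--         i = j
--     # Stage 2: word runs are joined with '/**/'; other runs pass through.
--     out = []
--     for b, texts in runs:
--         if b:
--             out.append(texts[0])
--             for t in texts[1:]:
--                 out += ["/**/", t]
--         else:
--             out += texts
--     return out
-- ===== Notes on version B (the rewrite author's own statement) =====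
-- stated objective: alternative
-- what changed: Replaced the stateful single-pass prev_kind scan by a staged group-then-emit algorithm: first split the stream into maximal runs of tokens with equal word-ness, then emit each word run with '/**/' joined between its texts and pass other runs through unchanged.
import Mathlib
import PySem

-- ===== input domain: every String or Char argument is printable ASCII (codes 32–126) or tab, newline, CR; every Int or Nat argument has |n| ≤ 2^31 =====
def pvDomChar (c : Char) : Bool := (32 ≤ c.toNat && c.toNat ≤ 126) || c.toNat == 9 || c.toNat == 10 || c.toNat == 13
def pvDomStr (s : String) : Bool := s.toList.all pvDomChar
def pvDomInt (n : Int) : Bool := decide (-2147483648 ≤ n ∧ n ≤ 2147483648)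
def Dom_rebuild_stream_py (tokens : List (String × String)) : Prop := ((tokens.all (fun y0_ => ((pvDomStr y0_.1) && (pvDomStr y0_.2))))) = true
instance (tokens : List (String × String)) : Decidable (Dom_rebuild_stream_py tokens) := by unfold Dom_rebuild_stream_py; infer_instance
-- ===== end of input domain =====

-- B replaces A's stateful prev_kind scan by a staged group-then-emit pass (maximal runs of
-- equal word-ness, word runs joined with "/**/"); same output, same O(n) cost.

-- ===== PORT A =====
-- 'kind in _WORD_KINDS' (a 4-element set of string literals)
def pvIsWordKind (k : String) : Bool :=
  k == "ID" || k == "NUM" || k == "STRING" || k == "CHAR"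

-- literal port of A: fold over tokens carrying (out, prev_kind); prev_kind starts as None
def rebuild_stream_py (tokens : List (String × String)) : List String :=
  (tokens.foldl
    (fun (st : List String × Option String) kt =>
      ((if (match st.2 with | some p => pvIsWordKind p | none => false) && pvIsWordKind kt.1
        then st.1 ++ ["/**/"] else st.1) ++ [kt.2], some kt.1))
    ([], none)).1

-- ===== PORT B =====
-- stage-1 helper: texts of the longest prefix whose kinds have word-ness b, plus the remainder
def pvSpanRun (b : Bool) : List (String × String) → List String × List (String × String)
  | [] => ([], [])
  | (k, t) :: rest =>
    if pvIsWordKind k == b then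
      let p := pvSpanRun b rest
      (t :: p.1, p.2)
    else ([], (k, t) :: rest)

theorem pvSpanRun_length (b : Bool) (xs : List (String × String)) :
    (pvSpanRun b xs).2.length ≤ xs.length := by
  induction xs with
  | nil => simp [pvSpanRun]
  | cons hd tl ih =>
    obtain ⟨k, t⟩ := hd
    simp only [pvSpanRun]
    split
    · simpa using Nat.le_succ_of_le ih
    · simp

-- stage 1 of Source B: the list of maximal runs (word-ness, texts of the run)
def pvRuns : List (String × String) → List (Bool × List String)
  | [] => []
  | (k, t) :: rest =>
    let b := pvIsWordKind k
    (b, t :: (pvSpanRun b rest).1) :: pvRuns (pvSpanRun b rest).2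
  termination_by xs => xs.length
  decreasing_by exact Nat.lt_succ_of_le (pvSpanRun_length _ _)

-- stage 2 of Source B: a word run is joined with "/**/", other runs pass through
def pvEmit (r : Bool × List String) : List String :=
  match r with
  | (true, []) => []
  | (true, t :: ts) => t :: ts.flatMap (fun s => ["/**/", s])
  | (false, ts) => ts

def rebuild_stream_py_alt (tokens : List (String × String)) : List String :=
  (pvRuns tokens).flatMap pvEmit

-- ===== PRECONDITION & SPEC =====
def Spec_rebuild_stream_py (tokens : List (String × String)) (out : List String) : Prop := out = rebuild_stream_py_alt tokens
instance (tokens : List (String × String)) (out : List String) : Decidable (Spec_rebuild_stream_py tokens out) := by unfold Spec_rebuild_stream_py; infer_instance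

-- ===== CLAIM (what is proved, stated in full; the proofs are below) =====
def Claim_equal_rebuild_stream_py : Prop := ∀ (tokens : List (String × String)), Dom_rebuild_stream_py tokens → Spec_rebuild_stream_py tokens (rebuild_stream_py tokens)

-- ===== LEMMAS AND PROOFS =====

-- reference recursion: the separator-inserting scan with g = word-ness of the previous token
def pvScan (g : Bool) : List (String × String) → List String
  | [] => []
  | (k, t) :: rest =>
    (if g && pvIsWordKind k then ["/**/", t] else [t]) ++ pvScan (pvIsWordKind k) rest

-- A's fold computes pvScan
theorem pvFoldA (xs : List (String × String)) :
    ∀ (acc : List String) (prev : Option String) (g : Bool),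
    (match prev with | some p => pvIsWordKind p | none => false) = g →
    (xs.foldl
      (fun (st : List String × Option String) kt =>
        ((if (match st.2 with | some p => pvIsWordKind p | none => false) && pvIsWordKind kt.1
          then st.1 ++ ["/**/"] else st.1) ++ [kt.2], some kt.1))
      (acc, prev)).1 = acc ++ pvScan g xs := by
  induction xs with
  | nil => intro acc prev g _; simp [pvScan]
  | cons hd tl ih =>
    intro acc prev g hg
    simp only [List.foldl_cons, pvScan, hg]
    rw [ih _ (some hd.1) (pvIsWordKind hd.1) rfl]
    by_cases h : (g && pvIsWordKind hd.1) = true <;> simp [h, List.append_assoc]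

-- splitting off one run preserves the scan (the tail resumes with g = false in all cases)
theorem pvScan_span (b : Bool) (xs : List (String × String)) :
    pvScan b xs =
      (if b then (pvSpanRun b xs).1.flatMap (fun s => ["/**/", s]) else (pvSpanRun b xs).1)
        ++ pvScan false (pvSpanRun b xs).2 := by
  induction xs with
  | nil => cases b <;> simp [pvSpanRun, pvScan]
  | cons hd tl ih =>
    obtain ⟨k, t⟩ := hd
    by_cases h : pvIsWordKind k = b
    · subst h
      simp only [pvSpanRun, beq_self_eq_true, if_true, pvScan]
      rw [ih]
      cases hb : pvIsWordKind k <;> simp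
    · have hb : (pvIsWordKind k == b) = false := by
        cases b <;> cases hk : pvIsWordKind k <;> simp_all
      simp only [pvSpanRun, hb, if_neg Bool.false_ne_true, pvScan]
      cases b <;> cases hk : pvIsWordKind k <;> simp_all

-- B's run-based emission computes pvScan false
theorem pvRuns_emit (xs : List (String × String)) :
    (pvRuns xs).flatMap pvEmit = pvScan false xs := by
  induction xs using pvRuns.induct with
  | case1 => simp [pvRuns, pvScan]
  | case2 k t rest b ih =>
    simp only [pvRuns, List.flatMap_cons]
    rw [ih]
    have hspan := pvScan_span (pvIsWordKind k) rest
    simp only [pvScan, Bool.false_and, if_neg Bool.false_ne_true, hspan]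
    cases hk : pvIsWordKind k <;>
      simp_all [pvEmit, show b = pvIsWordKind k from rfl]

-- ===== VERDICT (by name: the statement is the Claim_ definition above) =====
theorem rebuild_stream_py_spec : Claim_equal_rebuild_stream_py := by
  intro tokens _
  unfold Spec_rebuild_stream_py rebuild_stream_py rebuild_stream_py_alt
  rw [pvFoldA tokens [] none false rfl, pvRuns_emit]
  simp
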